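-- pv_equiv track=rewrite | github.com/ekarais/bachelor-thesis | datagen.py | sort_triples
-- ===== SOURCE A (Python) =====
-- def sort_triples(triples):
--     ss = []
--     sc = []
--     st = []
--     sn = []
--     sp = []
--     lc = []
--     lt = []
--     for triple in triples:
--         if triple[0] == 'shape' and triple[1] == 'size':
--             ss.append(triple)
--         elif triple[0] == 'shape' and triple[1] == 'color':
--             sc.append(triple)
--         elif triple[0] == 'shape' and triple[1] == 'type':
--             st.append(triple)
--         elif triple[0] == 'shape' and triple[1] == 'number':
--             sn.append(triple)
--         elif triple[0] == 'shape' and triple[1] == 'position':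
--             sp.append(triple)
--         elif triple[0] == 'line' and triple[1] == 'color':
--             lc.append(triple)
--         else:
--             lt.append(triple)
--
--     return ss + sc + st + sn + sp + lc + lt
-- ===== SOURCE B (Python) =====
-- def sort_triples(triples):
--     rank = {('shape', 'size'): 0, ('shape', 'color'): 1, ('shape', 'type'): 2,
--             ('shape', 'number'): 3, ('shape', 'position'): 4, ('line', 'color'): 5}
--     return sorted(triples, key=lambda t: rank.get((t[0], t[1]), 6))
-- ===== Notes on version B (the rewrite author's own statement) =====
-- stated objective: idiomatic
-- what changed: Replaces the seven-way if/elif bucketing loop with seven accumulator lists by a single stable sort keyed on a precomputed rank table (rank.get with default 6), relying on sort stability to keep each bucket's original order.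
import Mathlib
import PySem

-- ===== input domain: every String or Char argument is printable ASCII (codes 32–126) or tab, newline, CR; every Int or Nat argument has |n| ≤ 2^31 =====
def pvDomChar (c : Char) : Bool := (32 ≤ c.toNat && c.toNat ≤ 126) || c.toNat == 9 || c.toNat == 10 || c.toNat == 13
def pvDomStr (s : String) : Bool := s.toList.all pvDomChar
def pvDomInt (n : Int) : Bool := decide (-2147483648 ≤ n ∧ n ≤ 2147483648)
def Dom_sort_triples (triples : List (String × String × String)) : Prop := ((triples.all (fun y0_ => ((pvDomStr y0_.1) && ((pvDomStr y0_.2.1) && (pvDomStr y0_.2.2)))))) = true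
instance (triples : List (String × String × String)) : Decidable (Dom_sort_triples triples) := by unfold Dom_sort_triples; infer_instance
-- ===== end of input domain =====

-- B replaces A's seven-way if/elif bucketing-and-concatenation loop by one stable sort keyed
-- on a precomputed rank table (objective: idiomatic; no speed claim).

-- ===== PORT A =====
-- the loop body: route the triple into one of the seven accumulator lists, in A's branch order
def pvStepA (acc : List (String × String × String) × List (String × String × String) × List (String × String × String) × List (String × String × String) × List (String × String × String) × List (String × String × String) × List (String × String × String)) (t : String × String × String) :
    List (String × String × String) × List (String × String × String) × List (String × String × String) × List (String × String × String) × List (String × String × String) × List (String × String × String) × List (String × String × String) :=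
  match acc with
  | (ss, sc, st, sn, sp, lc, lt) =>
    if t.1 == "shape" && t.2.1 == "size" then (ss ++ [t], sc, st, sn, sp, lc, lt)
    else if t.1 == "shape" && t.2.1 == "color" then (ss, sc ++ [t], st, sn, sp, lc, lt)
    else if t.1 == "shape" && t.2.1 == "type" then (ss, sc, st ++ [t], sn, sp, lc, lt)
    else if t.1 == "shape" && t.2.1 == "number" then (ss, sc, st, sn ++ [t], sp, lc, lt)
    else if t.1 == "shape" && t.2.1 == "position" then (ss, sc, st, sn, sp ++ [t], lc, lt)
    else if t.1 == "line" && t.2.1 == "color" then (ss, sc, st, sn, sp, lc ++ [t], lt)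
    else (ss, sc, st, sn, sp, lc, lt ++ [t])

def sort_triples (triples : List (String × String × String)) : List (String × String × String) :=
  let r := triples.foldl pvStepA ([], [], [], [], [], [], [])
  r.1 ++ r.2.1 ++ r.2.2.1 ++ r.2.2.2.1 ++ r.2.2.2.2.1 ++ r.2.2.2.2.2.1 ++ r.2.2.2.2.2.2

-- ===== PORT B =====
-- the rank dict, built by the dict display in insertion order
def pvRank : PySem.Dict (String × String) Int :=
  (((((PySem.Dict.empty.insert ("shape", "size") 0).insert ("shape", "color") 1).insert
        ("shape", "type") 2).insert ("shape", "number") 3).insert ("shape", "position") 4).insert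
    ("line", "color") 5

-- the sort key: rank.get((t[0], t[1]), 6)
def pvKey (t : String × String × String) : Int := PySem.Dict.getD pvRank (t.1, t.2.1) 6

def sort_triples_alt (triples : List (String × String × String)) : List (String × String × String) :=
  PySem.List.sorted triples pvKey false

-- ===== PRECONDITION & SPEC =====
def Spec_sort_triples (triples : List (String × String × String)) (out : List (String × String × String)) : Prop := out = sort_triples_alt triples
instance (triples : List (String × String × String)) (out : List (String × String × String)) : Decidable (Spec_sort_triples triples out) := by unfold Spec_sort_triples; infer_instance

-- ===== CLAIM (what is proved, stated in full; the proofs are below) =====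
def Claim_equal_sort_triples : Prop := ∀ (triples : List (String × String × String)), Dom_sort_triples triples → Spec_sort_triples triples (sort_triples triples)

-- ===== LEMMAS AND PROOFS =====

-- one bucket: the elements of xs whose key is r, in order
def pvF {α : Type} (key : α → Int) (r : Int) (xs : List α) : List α :=
  xs.filter (fun t => key t == r)

-- the buckets for the ranks rs, concatenated
def pvBuckets {α : Type} (key : α → Int) (rs : List Int) (xs : List α) : List α :=
  rs.flatMap (fun r => pvF key r xs)

lemma key_mem_of_mem_buckets {α : Type} (key : α → Int) (rs : List Int) (xs : List α)
    (y : α) (hy : y ∈ pvBuckets key rs xs) : key y ∈ rs := by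
  simp only [pvBuckets, pvF, List.mem_flatMap, List.mem_filter, beq_iff_eq] at hy
  obtain ⟨r, hr, _, hk⟩ := hy
  exact hk ▸ hr

lemma key_eq_of_mem_F {α : Type} (key : α → Int) (r : Int) (xs : List α)
    (y : α) (hy : y ∈ pvF key r xs) : key y = r := by
  simp only [pvF, List.mem_filter, beq_iff_eq] at hy
  exact hy.2

-- insertBy passes over a prefix none of whose elements compare after x
lemma insertBy_skip {α : Type} (key : α → Int) (x : α) (L1 L2 : List α)
    (h : ∀ y ∈ L1, ¬ key x < key y) :
    PySem.List.insertBy (fun a b => decide (key a < key b)) x (L1 ++ L2)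
      = L1 ++ PySem.List.insertBy (fun a b => decide (key a < key b)) x L2 := by
  induction L1 with
  | nil => simp
  | cons a t ih =>
    have ha : ¬ key x < key a := h a (by simp)
    simp only [List.cons_append, PySem.List.insertBy, ha, decide_false]
    simp only [Bool.false_eq_true, if_false, List.cons_inj_right]
    exact ih (fun y hy => h y (by simp [hy]))

-- insertBy appends at the end when no element compares after x
lemma insertBy_end {α : Type} (key : α → Int) (x : α) (L : List α)
    (h : ∀ y ∈ L, ¬ key x < key y) :
    PySem.List.insertBy (fun a b => decide (key a < key b)) x L = L ++ [x] := by
  have := insertBy_skip key x L [] h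
  simpa [PySem.List.insertBy] using this

-- insertBy ignores a suffix all of whose elements compare after x
lemma insertBy_before_suffix {α : Type} (key : α → Int) (x : α) (L1 L2 : List α)
    (h : ∀ y ∈ L2, key x < key y) :
    PySem.List.insertBy (fun a b => decide (key a < key b)) x (L1 ++ L2)
      = PySem.List.insertBy (fun a b => decide (key a < key b)) x L1 ++ L2 := by
  induction L1 with
  | nil =>
    cases L2 with
    | nil => simp
    | cons b t =>
      have hb : key x < key b := h b (by simp)
      simp [PySem.List.insertBy, hb]
  | cons a t ih =>
    by_cases ha : key x < key a
    · simp [PySem.List.insertBy, ha]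
    · simp only [List.cons_append, PySem.List.insertBy, ha, decide_false,
        Bool.false_eq_true, if_false, List.cons_inj_right]
      exact ih

-- adding x at the back of xs adds x at the back of its own bucket and leaves the others unchanged
lemma F_append_self {α : Type} (key : α → Int) (x : α) (xs : List α) :
    pvF key (key x) (xs ++ [x]) = pvF key (key x) xs ++ [x] := by
  simp [pvF, List.filter_append]

lemma F_append_other {α : Type} (key : α → Int) (r : Int) (x : α) (xs : List α)
    (h : key x ≠ r) : pvF key r (xs ++ [x]) = pvF key r xs := by
  simp [pvF, List.filter_append, h]

lemma buckets_append_not_mem {α : Type} (key : α → Int) (rs : List Int) (x : α) (xs : List α)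
    (h : key x ∉ rs) : pvBuckets key rs (xs ++ [x]) = pvBuckets key rs xs := by
  induction rs with
  | nil => simp [pvBuckets]
  | cons r t ih =>
    have hr : key x ≠ r := fun e => h (by simp [e])
    simp only [pvBuckets, List.flatMap_cons] at *
    rw [F_append_other key r x xs hr, ih (fun m => h (by simp [m]))]

-- inserting x into the bucket concatenation puts it at the back of its own bucket
lemma insertBy_buckets {α : Type} (key : α → Int) (rs : List Int) (x : α) (xs : List α)
    (hp : rs.Pairwise (· < ·)) (hx : key x ∈ rs) :
    PySem.List.insertBy (fun a b => decide (key a < key b)) x (pvBuckets key rs xs)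
      = pvBuckets key rs (xs ++ [x]) := by
  induction rs with
  | nil => simp at hx
  | cons r t ih =>
    have hlt : ∀ s ∈ t, r < s := List.pairwise_cons.mp hp |>.1
    have hpt : t.Pairwise (· < ·) := List.pairwise_cons.mp hp |>.2
    simp only [pvBuckets, List.flatMap_cons] at *
    by_cases hr : key x = r
    · -- x lands at the end of the first bucket
      have h1 : ∀ y ∈ pvF key r xs, ¬ key x < key y := by
        intro y hy; rw [key_eq_of_mem_F key r xs y hy, hr]; omega
      have h2 : ∀ y ∈ t.flatMap (fun s => pvF key s xs), key x < key y := by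
        intro y hy
        have : key y ∈ t := key_mem_of_mem_buckets key t xs y hy
        rw [hr]; exact hlt _ this
      rw [insertBy_before_suffix key x _ _ h2, insertBy_end key x _ h1]
      have hnot : key x ∉ t := by
        intro m; have := hlt _ m; omega
      have := buckets_append_not_mem key t x xs hnot
      simp only [pvBuckets] at this
      rw [this, ← hr, F_append_self key x xs]
    · -- x belongs to a later bucket: skip the first one
      have hxt : key x ∈ t := by cases List.mem_cons.mp hx with
        | inl e => exact absurd e hr
        | inr m => exact m
      have h1 : ∀ y ∈ pvF key r xs, ¬ key x < key y := by
        intro y hy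
        rw [key_eq_of_mem_F key r xs y hy]
        have := hlt _ hxt; omega
      rw [insertBy_skip key x _ _ h1, ih hpt hxt, F_append_other key r x xs hr]

lemma foldl_insertBy_buckets {α : Type} (key : α → Int) (rs : List Int)
    (hp : rs.Pairwise (· < ·)) :
    ∀ (xs ys : List α), (∀ x ∈ xs, key x ∈ rs) →
      xs.foldl (fun acc x => PySem.List.insertBy (fun a b => decide (key a < key b)) x acc)
          (pvBuckets key rs ys)
        = pvBuckets key rs (ys ++ xs) := by
  intro xs
  induction xs with
  | nil => intro ys _; simp
  | cons x t ih =>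
    intro ys hmem
    have hx : key x ∈ rs := hmem x (by simp)
    simp only [List.foldl_cons]
    rw [insertBy_buckets key rs x ys hp hx, ih (ys ++ [x]) (fun z hz => hmem z (by simp [hz]))]
    simp

-- the stable sort by key is exactly the rank-bucket concatenation
lemma sorted_eq_buckets {α : Type} (key : α → Int) (rs : List Int) (xs : List α)
    (hp : rs.Pairwise (· < ·)) (hmem : ∀ x ∈ xs, key x ∈ rs) :
    PySem.List.sorted xs key false = pvBuckets key rs xs := by
  rw [PySem.List.sorted_eq_foldl_insertBy]
  have h0 : pvBuckets key rs ([] : List α) = [] := by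
    simp [pvBuckets, pvF]
  calc xs.foldl (fun acc x => PySem.List.insertBy (fun a b => decide (key a < key b)) x acc) []
      = xs.foldl (fun acc x => PySem.List.insertBy (fun a b => decide (key a < key b)) x acc)
          (pvBuckets key rs []) := by rw [h0]
    _ = pvBuckets key rs ([] ++ xs) := foldl_insertBy_buckets key rs hp xs [] hmem
    _ = pvBuckets key rs xs := by simp

-- pvKey evaluated on each pattern
lemma pvKey_ss {t : String × String × String} (h1 : t.1 = "shape") (h2 : t.2.1 = "size") :
    pvKey t = 0 := by simp only [pvKey, h1, h2]; decide
lemma pvKey_sc {t : String × String × String} (h1 : t.1 = "shape") (h2 : t.2.1 = "color") :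
    pvKey t = 1 := by simp only [pvKey, h1, h2]; decide
lemma pvKey_st {t : String × String × String} (h1 : t.1 = "shape") (h2 : t.2.1 = "type") :
    pvKey t = 2 := by simp only [pvKey, h1, h2]; decide
lemma pvKey_sn {t : String × String × String} (h1 : t.1 = "shape") (h2 : t.2.1 = "number") :
    pvKey t = 3 := by simp only [pvKey, h1, h2]; decide
lemma pvKey_sp {t : String × String × String} (h1 : t.1 = "shape") (h2 : t.2.1 = "position") :
    pvKey t = 4 := by simp only [pvKey, h1, h2]; decide
lemma pvKey_lc {t : String × String × String} (h1 : t.1 = "line") (h2 : t.2.1 = "color") :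
    pvKey t = 5 := by simp only [pvKey, h1, h2]; decide
lemma pvKey_other {t : String × String × String}
    (h1 : ¬ (t.1 = "shape" ∧ t.2.1 = "size")) (h2 : ¬ (t.1 = "shape" ∧ t.2.1 = "color"))
    (h3 : ¬ (t.1 = "shape" ∧ t.2.1 = "type")) (h4 : ¬ (t.1 = "shape" ∧ t.2.1 = "number"))
    (h5 : ¬ (t.1 = "shape" ∧ t.2.1 = "position")) (h6 : ¬ (t.1 = "line" ∧ t.2.1 = "color")) :
    pvKey t = 6 := by
  have n1 : (t.1, t.2.1) ≠ (("shape" : String), ("size" : String)) := by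
    simpa [Prod.ext_iff] using h1
  have n2 : (t.1, t.2.1) ≠ (("shape" : String), ("color" : String)) := by
    simpa [Prod.ext_iff] using h2
  have n3 : (t.1, t.2.1) ≠ (("shape" : String), ("type" : String)) := by
    simpa [Prod.ext_iff] using h3
  have n4 : (t.1, t.2.1) ≠ (("shape" : String), ("number" : String)) := by
    simpa [Prod.ext_iff] using h4
  have n5 : (t.1, t.2.1) ≠ (("shape" : String), ("position" : String)) := by
    simpa [Prod.ext_iff] using h5
  have n6 : (t.1, t.2.1) ≠ (("line" : String), ("color" : String)) := by
    simpa [Prod.ext_iff] using h6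
  simp only [pvKey, pvRank, PySem.Dict.getD_insert_of_ne _ _ _ n6,
    PySem.Dict.getD_insert_of_ne _ _ _ n5, PySem.Dict.getD_insert_of_ne _ _ _ n4,
    PySem.Dict.getD_insert_of_ne _ _ _ n3, PySem.Dict.getD_insert_of_ne _ _ _ n2,
    PySem.Dict.getD_insert_of_ne _ _ _ n1, PySem.Dict.getD_empty]

lemma pvKey_range (t : String × String × String) : pvKey t ∈ ([0, 1, 2, 3, 4, 5, 6] : List Int) := by
  by_cases c1 : t.1 = "shape" ∧ t.2.1 = "size"
  · simp [pvKey_ss c1.1 c1.2]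
  by_cases c2 : t.1 = "shape" ∧ t.2.1 = "color"
  · simp [pvKey_sc c2.1 c2.2]
  by_cases c3 : t.1 = "shape" ∧ t.2.1 = "type"
  · simp [pvKey_st c3.1 c3.2]
  by_cases c4 : t.1 = "shape" ∧ t.2.1 = "number"
  · simp [pvKey_sn c4.1 c4.2]
  by_cases c5 : t.1 = "shape" ∧ t.2.1 = "position"
  · simp [pvKey_sp c5.1 c5.2]
  by_cases c6 : t.1 = "line" ∧ t.2.1 = "color"
  · simp [pvKey_lc c6.1 c6.2]
  simp [pvKey_other c1 c2 c3 c4 c5 c6]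

-- A's accumulator loop, characterised by the buckets of the remaining input
lemma foldl_stepA (xs : List (String × String × String)) :
    ∀ ss sc st sn sp lc lt,
      (let r := xs.foldl pvStepA (ss, sc, st, sn, sp, lc, lt)
       r.1 ++ r.2.1 ++ r.2.2.1 ++ r.2.2.2.1 ++ r.2.2.2.2.1 ++ r.2.2.2.2.2.1 ++ r.2.2.2.2.2.2)
        = (ss ++ pvF pvKey 0 xs) ++ (sc ++ pvF pvKey 1 xs) ++ (st ++ pvF pvKey 2 xs)
            ++ (sn ++ pvF pvKey 3 xs) ++ (sp ++ pvF pvKey 4 xs) ++ (lc ++ pvF pvKey 5 xs)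
            ++ (lt ++ pvF pvKey 6 xs) := by
  induction xs with
  | nil => intro ss sc st sn sp lc lt; simp [pvF]
  | cons x xs ih =>
    intro ss sc st sn sp lc lt
    simp only [List.foldl_cons, pvStepA]
    split_ifs with c1 c2 c3 c4 c5 c6
    · obtain ⟨h1, h2⟩ : x.1 = "shape" ∧ x.2.1 = "size" := by simpa using c1
      rw [ih]; simp [pvF, pvKey_ss h1 h2]
    · obtain ⟨h1, h2⟩ : x.1 = "shape" ∧ x.2.1 = "color" := by simpa using c2
      rw [ih]; simp [pvF, pvKey_sc h1 h2]
    · obtain ⟨h1, h2⟩ : x.1 = "shape" ∧ x.2.1 = "type" := by simpa using c3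
      rw [ih]; simp [pvF, pvKey_st h1 h2]
    · obtain ⟨h1, h2⟩ : x.1 = "shape" ∧ x.2.1 = "number" := by simpa using c4
      rw [ih]; simp [pvF, pvKey_sn h1 h2]
    · obtain ⟨h1, h2⟩ : x.1 = "shape" ∧ x.2.1 = "position" := by simpa using c5
      rw [ih]; simp [pvF, pvKey_sp h1 h2]
    · obtain ⟨h1, h2⟩ : x.1 = "line" ∧ x.2.1 = "color" := by simpa using c6
      rw [ih]; simp [pvF, pvKey_lc h1 h2]
    · have hk : pvKey x = 6 := pvKey_other (by simpa using c1) (by simpa using c2)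
        (by simpa using c3) (by simpa using c4) (by simpa using c5) (by simpa using c6)
      rw [ih]; simp [pvF, hk]

-- ===== VERDICT (by name: the statement is the Claim_ definition above) =====
theorem sort_triples_spec : Claim_equal_sort_triples := by
  intro triples _
  unfold Spec_sort_triples sort_triples sort_triples_alt
  rw [sorted_eq_buckets pvKey [0, 1, 2, 3, 4, 5, 6] triples (by decide)
      (fun x _ => pvKey_range x)]
  have := foldl_stepA triples [] [] [] [] [] [] []
  simp only [List.nil_append] at this
  rw [this]
  simp [pvBuckets]
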